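-- pv_equiv track=rewrite | github.com/thokchomlolet03-cpu/discovery_intelligence_system | system/services/experiment_service.py | _expected_learning_value
-- ===== SOURCE A (Python) =====
-- from typing import Any
--
-- def _clean_text(value: Any, default: str = "") -> str:
--     text = str(value or "").strip()
--     return text or default
--
-- def _expected_learning_value(link_snapshot: list[dict[str, str]]) -> str:
--     if not link_snapshot:
--         return "This experiment primarily reduces uncertainty around a claim that currently has little attached context."
--     relation_counts: dict[str, int] = {}
--     for item in link_snapshot:
--         relation = _clean_text(item.get("relation_type"), default="context_only")
--         relation_counts[relation] = relation_counts.get(relation, 0) + 1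
--     if relation_counts.get("derived_from", 0) and not relation_counts.get("supports", 0):
--         return "This experiment helps distinguish a recommendation-derived claim from stronger evidence-backed support."
--     return "This experiment helps test whether the current attached claim context should remain trusted, weakened, or revised."
-- ===== SOURCE B (Python) =====
-- def _clean_text(value, default=""):
--     text = str(value or "").strip()
--     return text or default
--
-- def _expected_learning_value(link_snapshot):
--     if not link_snapshot:
--         return "This experiment primarily reduces uncertainty around a claim that currently has little attached context."
--     has_derived = any(_clean_text(item.get("relation_type"), default="context_only") == "derived_from"
--                       for item in link_snapshot)
--     has_supports = any(_clean_text(item.get("relation_type"), default="context_only") == "supports"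
--                        for item in link_snapshot)
--     if has_derived and not has_supports:
--         return "This experiment helps distinguish a recommendation-derived claim from stronger evidence-backed support."
--     return "This experiment helps test whether the current attached claim context should remain trusted, weakened, or revised."
-- ===== Notes on version B (the rewrite author's own statement) =====
-- stated objective: simpler
-- what changed: B drops the relation_counts dictionary entirely and just computes two presence booleans with any() over the snapshot, since the final decision only depends on whether 'derived_from' and 'supports' occur at all.
import Mathlib
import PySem

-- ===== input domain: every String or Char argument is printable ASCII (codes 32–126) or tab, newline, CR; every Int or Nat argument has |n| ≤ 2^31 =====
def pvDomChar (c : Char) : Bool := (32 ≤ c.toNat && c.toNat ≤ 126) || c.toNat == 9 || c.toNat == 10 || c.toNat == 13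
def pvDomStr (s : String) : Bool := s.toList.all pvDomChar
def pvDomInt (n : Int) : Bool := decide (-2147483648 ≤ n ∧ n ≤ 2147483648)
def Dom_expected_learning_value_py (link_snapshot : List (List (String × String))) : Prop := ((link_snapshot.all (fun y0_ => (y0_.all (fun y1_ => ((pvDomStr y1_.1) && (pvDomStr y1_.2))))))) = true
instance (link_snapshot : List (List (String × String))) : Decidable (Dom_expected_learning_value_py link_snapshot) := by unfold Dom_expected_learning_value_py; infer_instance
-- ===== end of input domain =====

-- B replaces A's relation_counts dictionary by two any()-presence booleans over the snapshot: simpler, same O(n).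


-- shared module helper _clean_text, specialised to its two call shapes here:
-- _clean_text(item.get("relation_type"), default="context_only"); value is None or a str,
-- so 'str(value or "")' is value with None/"" collapsed to "" (= Option.getD "").
def pyCleanRel (v : Option String) : String :=
  let t := PySem.Str.strip (v.getD "")
  if t = "" then "context_only" else t

-- ===== PORT A =====
def expected_learning_value_py (link_snapshot : List (List (String × String))) : String :=
  if link_snapshot = [] then
    "This experiment primarily reduces uncertainty around a claim that currently has little attached context."
  else
    let relation_counts : PySem.Dict String Int :=
      link_snapshot.foldl (fun d item =>
        let relation := pyCleanRel ((PySem.Dict.mk item).get? "relation_type")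
        d.insert relation (d.getD relation 0 + 1)) PySem.Dict.empty
    if relation_counts.getD "derived_from" 0 ≠ 0 ∧ relation_counts.getD "supports" 0 = 0 then
      "This experiment helps distinguish a recommendation-derived claim from stronger evidence-backed support."
    else
      "This experiment helps test whether the current attached claim context should remain trusted, weakened, or revised."

-- ===== PORT B =====
def expected_learning_value_py_alt (link_snapshot : List (List (String × String))) : String :=
  if link_snapshot = [] then
    "This experiment primarily reduces uncertainty around a claim that currently has little attached context."
  else
    let has_derived := link_snapshot.any (fun item =>
      pyCleanRel ((PySem.Dict.mk item).get? "relation_type") == "derived_from")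
    let has_supports := link_snapshot.any (fun item =>
      pyCleanRel ((PySem.Dict.mk item).get? "relation_type") == "supports")
    if has_derived && !has_supports then
      "This experiment helps distinguish a recommendation-derived claim from stronger evidence-backed support."
    else
      "This experiment helps test whether the current attached claim context should remain trusted, weakened, or revised."

-- ===== PRECONDITION & SPEC =====
def Spec_expected_learning_value_py (link_snapshot : List (List (String × String))) (out : String) : Prop := out = expected_learning_value_py_alt link_snapshot
instance (link_snapshot : List (List (String × String))) (out : String) : Decidable (Spec_expected_learning_value_py link_snapshot out) := by unfold Spec_expected_learning_value_py; infer_instance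

-- ===== CLAIM =====
def Claim_equal_expected_learning_value_py : Prop := ∀ (link_snapshot : List (List (String × String))), Dom_expected_learning_value_py link_snapshot → Spec_expected_learning_value_py link_snapshot (expected_learning_value_py link_snapshot)

-- ===== LEMMAS AND PROOFS =====

theorem elv_counts_eq_count (rel : List (String × String) → String)
    (ls : List (List (String × String))) (d : PySem.Dict String Int) (v : String) :
    (ls.foldl (fun d item => d.insert (rel item) (d.getD (rel item) 0 + 1)) d).getD v 0
      = d.getD v 0 + (ls.map rel).count v := by
  induction ls generalizing d with
  | nil => simp
  | cons a tl ih =>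
      simp only [List.foldl_cons, List.map_cons, List.count_cons, ih,
        PySem.Dict.getD_insert]
      by_cases hv : v = rel a <;> simp [hv] <;> first | ring | exact fun h => hv h.symm

theorem elv_count_ne_zero_iff_any (ls : List (List (String × String))) (v : String) :
    ((ls.map (fun item => pyCleanRel ((PySem.Dict.mk item).get? "relation_type"))).count v ≠ 0)
      ↔ (ls.any (fun item => pyCleanRel ((PySem.Dict.mk item).get? "relation_type") == v) = true) := by
  rw [Ne, List.count_eq_zero]
  simp

-- ===== VERDICT =====
theorem expected_learning_value_py_spec : Claim_equal_expected_learning_value_py := by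
  intro ls _
  unfold Spec_expected_learning_value_py expected_learning_value_py expected_learning_value_py_alt
  by_cases h : ls = []
  · simp [h]
  · simp only [h, if_false]
    simp only [elv_counts_eq_count (fun item => pyCleanRel ((PySem.Dict.mk item).get? "relation_type")),
      PySem.Dict.getD_empty]
    have hd' := elv_count_ne_zero_iff_any ls "derived_from"
    have hs' := elv_count_ne_zero_iff_any ls "supports"
    by_cases hd : (ls.map (fun item => pyCleanRel ((PySem.Dict.mk item).get? "relation_type"))).count "derived_from" = 0
      <;> by_cases hs : (ls.map (fun item => pyCleanRel ((PySem.Dict.mk item).get? "relation_type"))).count "supports" = 0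
      <;> simp_all
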